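-- pv_equiv track=rewrite | github.com/Steven-Robertson2229/Counterexamples_to_the_p-t-_adic_Littlewood_Conjecture_Over_Small_Finite_Fields | CollabVersion3.py | pap_f5
-- ===== SOURCE A (Python) =====
-- def pap_f5(n):
--     n += 1
--     if n == 0:
--         return 0
--     while n-(n//2)*2 == 0:
--         n=n//2
--     if int(n)%8 == 1:
--         return 0
--     elif int(n)%8 == 3:
--         return 1
--     elif int(n)%8 == 5:
--         return 2
--     else:
--         return 3
-- ===== SOURCE B (Python) =====
-- def pap_f5(n):
--     n += 1
--     if n == 0:
--         return 0
--     t = n & -n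
--     return ((n // t) % 8 - 1) // 2
-- ===== Notes on version B (the rewrite author's own statement) =====
-- stated objective: simpler
-- what changed: Replaces the iterative halving loop and four-way if/elif cascade by the constant-time bit trick n & -n to strip the power of two and the arithmetic formula ((odd % 8) - 1) // 2 to classify the odd part.
import Mathlib
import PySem

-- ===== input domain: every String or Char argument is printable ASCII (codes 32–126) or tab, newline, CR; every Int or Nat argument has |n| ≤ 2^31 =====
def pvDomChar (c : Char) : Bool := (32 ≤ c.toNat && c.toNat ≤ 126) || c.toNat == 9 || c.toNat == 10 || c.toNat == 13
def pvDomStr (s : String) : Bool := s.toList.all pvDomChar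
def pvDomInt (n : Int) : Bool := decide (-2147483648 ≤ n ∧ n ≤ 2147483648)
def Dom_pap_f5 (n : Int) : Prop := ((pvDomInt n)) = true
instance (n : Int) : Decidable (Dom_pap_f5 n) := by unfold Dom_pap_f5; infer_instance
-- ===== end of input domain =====

-- B replaces A's iterative halving loop and four-way if/elif cascade by the bit trick
-- n & -n (odd part = n // (n & -n)) and the formula ((odd % 8) - 1) // 2 (objective: simpler).

-- ===== PORT A =====
-- A's while loop: keep halving while n - (n//2)*2 == 0. The `n ≠ 0` conjunct is only a
-- totality guard (Python never reaches the loop with n = 0, since it returned earlier).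
def pap_f5_strip (n : Int) : Int :=
  if _h : n - (PySem.Int.floordiv n 2) * 2 = 0 ∧ n ≠ 0 then
    pap_f5_strip (PySem.Int.floordiv n 2)
  else n
termination_by n.natAbs
decreasing_by
  obtain ⟨he, hne⟩ := _h
  rw [PySem.Int.floordiv_eq_ediv_of_pos (by norm_num)] at he ⊢
  omega

def pap_f5 (n : Int) : Int :=
  let n := n + 1
  if n = 0 then 0
  else
    let n := pap_f5_strip n
    if PySem.Int.mod n 8 = 1 then 0
    else if PySem.Int.mod n 8 = 3 then 1
    else if PySem.Int.mod n 8 = 5 then 2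
    else 3

-- ===== PORT B =====
-- `PySem.Int.band` is Python's `&` (exact on negatives, infinite two's complement).
def pap_f5_alt (n : Int) : Int :=
  let n := n + 1
  if n = 0 then 0
  else
    let t := PySem.Int.band n (-n)
    PySem.Int.floordiv (PySem.Int.mod (PySem.Int.floordiv n t) 8 - 1) 2

-- ===== PRECONDITION & SPEC =====
def Spec_pap_f5 (n : Int) (out : Int) : Prop := out = pap_f5_alt n
instance (n : Int) (out : Int) : Decidable (Spec_pap_f5 n out) := by unfold Spec_pap_f5; infer_instance

-- ===== CLAIM (what is proved, stated in full; the proofs are below) =====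
def Claim_equal_pap_f5 : Prop := ∀ (n : Int), Dom_pap_f5 n → Spec_pap_f5 n (pap_f5 n)

-- ===== LEMMAS AND PROOFS =====

-- the lowest set bit of k, written as Python's k & -k computes it on the Nat side
def pvLowbit (k : Nat) : Nat := k - (k &&& (k-1))

theorem pvLowbit_odd (k : Nat) (h : k % 2 = 1) : pvLowbit k = 1 := by
  obtain ⟨q, rfl⟩ : ∃ q, k = 2*q+1 := ⟨k/2, by omega⟩
  have h1 : (2*q+1) &&& (2*q) = 2*q := by
    have := Nat.land_bit true q false q
    simpa [Nat.bit, Nat.and_self] using this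
  simp only [pvLowbit]
  rw [show 2*q+1-1 = 2*q from rfl, h1]
  omega

theorem pvLowbit_even (a : Nat) (h : a ≠ 0) : pvLowbit (2*a) = 2 * pvLowbit a := by
  have h1 : (2*a) &&& (2*a-1) = 2*(a &&& (a-1)) := by
    have := Nat.land_bit false a true (a-1)
    have e : Nat.bit true (a-1) = 2*a-1 := by simp [Nat.bit]; omega
    rw [e] at this
    simpa [Nat.bit] using this
  have h2 : a &&& (a-1) ≤ a := Nat.and_le_left
  simp only [pvLowbit]
  rw [h1]
  omega

theorem pvLowbit_pos (k : Nat) (h : k ≠ 0) : 0 < pvLowbit k := by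
  induction k using Nat.strong_induction_on with
  | _ k ih =>
    rcases Nat.even_or_odd k with ⟨a, ha⟩ | hodd
    · subst ha
      rw [show a + a = 2*a from by omega, pvLowbit_even a (by omega)]
      have := ih a (by omega) (by omega)
      omega
    · rw [pvLowbit_odd k (Nat.odd_iff.mp hodd)]; omega

-- Python's m & -m equals the lowest set bit of |m|
theorem band_neg_self (m : Int) (h : m ≠ 0) :
    PySem.Int.band m (-m) = ((pvLowbit m.natAbs : Nat) : Int) := by
  rcases lt_or_gt_of_ne h with hm | hm
  · simp only [PySem.Int.band, pvLowbit]
    rw [if_neg (by omega), if_pos (by omega),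
      show (-m).toNat = m.natAbs from by omega,
      show (-m-1).toNat = m.natAbs - 1 from by omega]
  · simp only [PySem.Int.band, pvLowbit]
    rw [if_pos (by omega), if_neg (by omega),
      show m.toNat = m.natAbs from by omega,
      show (-(-m)-1).toNat = m.natAbs - 1 from by omega]

-- characterisation of A's stripping loop: its result q is odd and lowbit |m| * q = m
theorem strip_spec (k : Nat) : ∀ (m : Int), m.natAbs = k → m ≠ 0 →
    ((pvLowbit m.natAbs : Nat) : Int) * pap_f5_strip m = m ∧ (pap_f5_strip m) % 2 = 1 := by
  induction k using Nat.strong_induction_on with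
  | _ k ih =>
    intro m hk hm
    rw [pap_f5_strip.eq_def]
    simp only [show ∀ x : Int, PySem.Int.floordiv x 2 = x / 2 from
      fun x => PySem.Int.floordiv_eq_ediv_of_pos (by norm_num)]
    by_cases hc : m - m / 2 * 2 = 0
    · rw [dif_pos ⟨hc, hm⟩]
      have ha : m = 2 * (m / 2) := by omega
      have hane : m / 2 ≠ 0 := by omega
      obtain ⟨ih1, ih2⟩ := ih (m / 2).natAbs (by omega) (m / 2) rfl hane
      refine ⟨?_, ih2⟩
      rw [show m.natAbs = 2 * (m / 2).natAbs from by omega,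
        pvLowbit_even _ (by omega)]
      push_cast
      linarith [ih1]
    · rw [dif_neg (by tauto)]
      have hmod : m % 2 = 1 := by omega
      refine ⟨?_, hmod⟩
      rw [pvLowbit_odd m.natAbs (by omega)]
      simp

-- ===== VERDICT (by name: the statement is the Claim_ definition above) =====
theorem pap_f5_spec : Claim_equal_pap_f5 := by
  unfold Claim_equal_pap_f5 Spec_pap_f5
  intro n _
  show pap_f5 n = pap_f5_alt n
  simp only [pap_f5, pap_f5_alt]
  by_cases h0 : n + 1 = 0
  · simp [h0]
  · rw [if_neg h0, if_neg h0]
    set m := n + 1 with hm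
    obtain ⟨hq, hodd⟩ := strip_spec m.natAbs m rfl h0
    set q := pap_f5_strip m with hqdef
    set L : Int := ((pvLowbit m.natAbs : Nat) : Int) with hL
    have hLpos : 0 < L := by
      have := pvLowbit_pos m.natAbs (by omega)
      omega
    -- B's division recovers q
    have hdiv : PySem.Int.floordiv m (PySem.Int.band m (-m)) = q := by
      rw [band_neg_self m h0, ← hL,
        PySem.Int.floordiv_eq_ediv_of_pos hLpos, ← hq,
        Int.mul_ediv_cancel_left _ (by omega)]
    rw [hdiv]
    -- both sides now classify the odd q
    rw [show PySem.Int.mod q 8 = q % 8 from PySem.Int.mod_eq_emod_of_pos (by norm_num),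
      show ∀ x : Int, PySem.Int.floordiv x 2 = x / 2 from
        fun x => PySem.Int.floordiv_eq_ediv_of_pos (by norm_num)]
    have hr1 : 0 ≤ q % 8 := by omega
    have hr2 : q % 8 < 8 := by omega
    have hr3 : q % 8 % 2 = 1 := by omega
    split_ifs <;> omega
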